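-- pv_equiv track=rewrite | github.com/Drakovek/ILikeFrog | ilikefrog.py | english_to_frog
-- ===== SOURCE A (Python) =====
-- def pad_num(num:str) -> str:
--     padded = num
--     while len(padded) < 5:
--         padded = "0" + padded
--     return padded
--
-- def decimal_to_ternary(decimal:int) -> str:
--     if decimal == 0:
--         return "0"
--     main = decimal//3
--     remainder = decimal%3
--     if main == 0:
--         return str(remainder)
--     else:
--         return decimal_to_ternary(main) + str(remainder)
--
-- def english_to_frog(text:str):
--     frog = ""
--     for cnum in range(0, len(text)):
--         char = ord(text[cnum])
--         if(char < 128):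
--             frog = frog + pad_num(decimal_to_ternary(char))
--     # Convert ternary values to frog-speak
--     frog = frog.replace("0", "I")
--     frog = frog.replace("1", "Like")
--     frog = frog.replace("2", "Frog")
--     return frog
-- ===== SOURCE B (Python) =====
-- WORDS = {0: "I", 1: "Like", 2: "Frog"}
--
-- def english_to_frog(text: str):
--     parts = []
--     for ch in text:
--         n = ord(ch)
--         if n < 128:
--             digits = []
--             for _ in range(5):
--                 n, r = divmod(n, 3)
--                 digits.append(WORDS[r])
--             parts.extend(reversed(digits))
--     return "".join(parts)
-- ===== Notes on version B (the rewrite author's own statement) =====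
-- stated objective: simpler
-- what changed: B generates exactly 5 ternary digits per character with a fixed-count divmod loop and maps each digit straight to its word while building a list joined once, eliminating A's recursive base conversion, the pad_num while-loop, and the three whole-string replace passes.
import Mathlib
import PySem

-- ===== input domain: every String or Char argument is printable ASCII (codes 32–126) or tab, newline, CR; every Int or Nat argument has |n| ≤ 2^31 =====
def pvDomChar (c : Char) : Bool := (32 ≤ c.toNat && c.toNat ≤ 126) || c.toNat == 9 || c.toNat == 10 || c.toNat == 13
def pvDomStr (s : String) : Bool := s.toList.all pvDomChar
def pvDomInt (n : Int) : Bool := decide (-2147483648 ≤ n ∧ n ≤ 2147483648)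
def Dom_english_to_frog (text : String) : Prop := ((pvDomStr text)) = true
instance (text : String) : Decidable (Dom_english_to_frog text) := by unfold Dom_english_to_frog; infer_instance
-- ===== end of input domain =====

-- B builds each character's 5 ternary digits with a fixed-count divmod loop and maps digits
-- straight to words, replacing A's recursive conversion + padding + three replace passes (simpler).


-- ===== PORT A =====
-- while len(padded) < 5: padded = "0" + padded   (fuel 5 always suffices: at most 5 - len iterations)
def pad_num_go : Nat → List Char → List Char
  | 0, padded => padded
  | fuel + 1, padded => if padded.length < 5 then pad_num_go fuel ('0' :: padded) else padded

def pad_num (num : List Char) : List Char := pad_num_go 5 num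

-- recursive ternary conversion, made structural with fuel (decimal.toNat + 1 always
-- suffices for decimal ≥ 0: the quotient strictly decreases; Python itself diverges on
-- negative input, which ord never produces — out of fuel returns [])
def decimal_to_ternary_go : Nat → Int → List Char
  | 0, _ => []
  | fuel + 1, decimal =>
    if decimal = 0 then ['0']
    else
      let main := PySem.Int.floordiv decimal 3
      let remainder := PySem.Int.mod decimal 3
      if main = 0 then PySem.Int.toChars remainder
      else decimal_to_ternary_go fuel main ++ PySem.Int.toChars remainder

def decimal_to_ternary (decimal : Int) : List Char :=
  decimal_to_ternary_go (decimal.toNat + 1) decimal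

def english_to_frog (text : String) : String :=
  let frog : List Char :=
    (PySem.List.pyRange 0 (PySem.Str.len text) 1).foldl
      (fun frog cnum =>
        let char : Int := ((PySem.List.pyGetD text.toList cnum ' ').toNat : Int)
        if char < 128 then frog ++ pad_num (decimal_to_ternary char) else frog) []
  let frog := PySem.Chars.replace frog ['0'] ['I']
  let frog := PySem.Chars.replace frog ['1'] ['L','i','k','e']
  let frog := PySem.Chars.replace frog ['2'] ['F','r','o','g']
  String.mk frog

-- ===== PORT B =====
-- WORDS = {0: "I", 1: "Like", 2: "Frog"}
def pvWORDS : PySem.Dict Int (List Char) :=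
  PySem.Dict.mk [((0 : Int), ['I']), ((1 : Int), ['L','i','k','e']), ((2 : Int), ['F','r','o','g'])]

-- for _ in range(5): n, r = divmod(n, 3); digits.append(WORDS[r])
def pvDigitLoop : Nat → Int → List (List Char) → (Int × List (List Char))
  | 0, n, digits => (n, digits)
  | k + 1, n, digits =>
      pvDigitLoop k (PySem.Int.floordiv n 3)
        (digits ++ [PySem.Dict.getD pvWORDS (PySem.Int.mod n 3) []])

def english_to_frog_alt (text : String) : String :=
  let parts : List (List Char) :=
    text.toList.foldl
      (fun parts ch =>
        let n : Int := (ch.toNat : Int)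
        if n < 128 then parts ++ ((pvDigitLoop 5 n []).2).reverse else parts) []
  String.mk parts.flatten

-- ===== PRECONDITION & SPEC =====
def Spec_english_to_frog (text : String) (out : String) : Prop := out = english_to_frog_alt text
instance (text : String) (out : String) : Decidable (Spec_english_to_frog text out) := by unfold Spec_english_to_frog; infer_instance

-- ===== CLAIM (what is proved, stated in full; the proofs are below) =====
def Claim_equal_english_to_frog : Prop := ∀ (text : String), Dom_english_to_frog text → Spec_english_to_frog text (english_to_frog text)

-- ===== LEMMAS AND PROOFS =====

-- one-character replace is an elementwise substitution
theorem replace_go_single (o : Char) (new : List Char) :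
    ∀ (fuel : Nat) (l acc : List Char), l.length ≤ fuel →
      PySem.Chars.replace.go [o] new fuel l acc
        = acc.reverse ++ l.flatMap (fun c => if c = o then new else [c]) := by
  intro fuel
  induction fuel with
  | zero =>
      intro l acc h
      cases l with
      | nil => simp [PySem.Chars.replace.go]
      | cons c t => simp at h
  | succ k ih =>
      intro l acc h
      cases l with
      | nil => simp [PySem.Chars.replace.go]
      | cons c t =>
        by_cases hco : c = o
        · have hpre : List.isPrefixOf [o] (c :: t) = true := by
            simp [List.isPrefixOf, hco]
          rw [PySem.Chars.replace.go] ; simp only [hpre, if_pos]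
          rw [show List.drop [o].length (c :: t) = t from rfl]
          rw [ih t (new.reverse ++ acc) (by simpa using Nat.le_of_succ_le_succ h)]
          simp [hco]
        · have hpre : List.isPrefixOf [o] (c :: t) = false := by
            simp [List.isPrefixOf]; exact fun hh => (hco hh.symm).elim
          rw [PySem.Chars.replace.go] ; simp only [hpre]
          rw [ih t (c :: acc) (by simpa using Nat.le_of_succ_le_succ h)]
          simp [hco]

theorem replace_single (o : Char) (new cs : List Char) :
    PySem.Chars.replace cs [o] new = cs.flatMap (fun c => if c = o then new else [c]) := by
  rw [PySem.Chars.replace]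
  simp only [List.isEmpty_cons, Bool.false_eq_true, if_false]
  simpa using replace_go_single o new cs.length cs [] (le_refl _)

-- the composed substitution A applies after its loop
def pvSubst (cs : List Char) : List Char :=
  (((cs.flatMap (fun c => if c = '0' then ['I'] else [c])).flatMap
      (fun c => if c = '1' then ['L','i','k','e'] else [c])).flatMap
      (fun c => if c = '2' then ['F','r','o','g'] else [c]))

theorem pvSubst_append (xs ys : List Char) :
    pvSubst (xs ++ ys) = pvSubst xs ++ pvSubst ys := by
  simp [pvSubst]

theorem pvSubst_flatMap (g : Char → List Char) (l : List Char) :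
    pvSubst (l.flatMap g) = l.flatMap (fun c => pvSubst (g c)) := by
  induction l with
  | nil => simp [pvSubst]
  | cons c t ih => simp [List.flatMap_cons, pvSubst_append, ih]

theorem flatten_flatMap (l : List Char) (g : Char → List (List Char)) :
    (l.flatMap g).flatten = l.flatMap (fun x => (g x).flatten) := by
  induction l with
  | nil => simp
  | cons c t ih => simp [ih]

-- per-character agreement for every code below 128 (kernel-checked)
set_option maxRecDepth 100000 in
theorem per_char (n : Nat) (hn : n < 128) :
    pvSubst (pad_num (decimal_to_ternary (n : Int)))
      = ((pvDigitLoop 5 (n : Int) []).2).reverse.flatten := by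
  have hall : ∀ m ∈ List.range 128,
      pvSubst (pad_num (decimal_to_ternary (m : Int)))
        = ((pvDigitLoop 5 (m : Int) []).2).reverse.flatten := by decide
  exact hall n (List.mem_range.mpr hn)

-- ===== VERDICT (by name: the statement is the Claim_ definition above) =====
theorem english_to_frog_spec : Claim_equal_english_to_frog := by
  intro text _
  unfold Spec_english_to_frog english_to_frog english_to_frog_alt
  simp only [PySem.Str.len_eq]
  rw [PySem.List.foldl_pyRange_zero_pyGetD' text.toList ' '
        (fun frog c => if ((c.toNat : Int)) < 128 then frog ++ pad_num (decimal_to_ternary ((c.toNat : Int))) else frog) []]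
  rw [PySem.List.foldl_ite_eq_foldl_filter, PySem.List.foldl_ite_eq_foldl_filter,
      PySem.List.foldl_append_eq_flatMap, PySem.List.foldl_append_eq_flatMap]
  simp only [replace_single]
  simp only [List.nil_append]
  show String.mk (pvSubst _) = _
  rw [pvSubst_flatMap]
  congr 1
  rw [flatten_flatMap]
  exact List.flatMap_congr (fun c hc => per_char c.toNat (by
    have := List.of_mem_filter hc
    simpa using this))
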